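-- pv_equiv track=rewrite | github.com/OffGrid0xDAO/OffGrid-Scalp-Bot | archive/old_implementation/backup_before_deep_cleanup_20251020_154101/backtest_ema_strategy.py | count_ribbon_flips
-- ===== SOURCE A (Python) =====
-- from typing import List, Dict, Tuple
--
-- def count_ribbon_flips(data: List[Dict], index: int, minutes: int) -> int:
--     """
--     Count how many times ribbon flipped between green/red in time window
--     """
--     points_needed = minutes * 6
--     start_idx = max(0, index - points_needed)
--     window = data[start_idx:index + 1]
--
--     flips = 0
--     last_direction = None
--
--     for point in window:
--         state = point['state'].lower()
--
--         # Determine direction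
--         if 'green' in state:
--             direction = 'green'
--         elif 'red' in state:
--             direction = 'red'
--         else:
--             continue
--
--         # Count flip if direction changed
--         if last_direction and last_direction != direction:
--             flips += 1
--
--         last_direction = direction
--
--     return flips
-- ===== SOURCE B (Python) =====
-- def _direction(state):
--     s = state.lower()
--     if 'green' in s:
--         return 'green'
--     if 'red' in s:
--         return 'red'
--     return None
--
--
-- def _summary(w):
--     # segment summary: None if no directional point, else (first_dir, last_dir, flips)
--     n = len(w)
--     if n <= 1:
--         if n == 0:
--             return None
--         d = _direction(w[0]['state'])
--         return None if d is None else (d, d, 0)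
--     m = n // 2
--     left = _summary(w[:m])
--     right = _summary(w[m:])
--     if left is None:
--         return right
--     if right is None:
--         return left
--     return (left[0], right[1], left[2] + right[2] + (1 if left[1] != right[0] else 0))
--
--
-- def count_ribbon_flips(data, index, minutes):
--     window = data[max(0, index - minutes * 6):index + 1]
--     s = _summary(window)
--     return 0 if s is None else s[2]
-- ===== Notes on version B (the rewrite author's own statement) =====
-- stated objective: alternative
-- what changed: Replaces A's sequential fused loop (flips counter + last-direction state) by a divide-and-conquer computation of segment summaries (first direction, last direction, flips) merged with an associative combine.
import Mathlib
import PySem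

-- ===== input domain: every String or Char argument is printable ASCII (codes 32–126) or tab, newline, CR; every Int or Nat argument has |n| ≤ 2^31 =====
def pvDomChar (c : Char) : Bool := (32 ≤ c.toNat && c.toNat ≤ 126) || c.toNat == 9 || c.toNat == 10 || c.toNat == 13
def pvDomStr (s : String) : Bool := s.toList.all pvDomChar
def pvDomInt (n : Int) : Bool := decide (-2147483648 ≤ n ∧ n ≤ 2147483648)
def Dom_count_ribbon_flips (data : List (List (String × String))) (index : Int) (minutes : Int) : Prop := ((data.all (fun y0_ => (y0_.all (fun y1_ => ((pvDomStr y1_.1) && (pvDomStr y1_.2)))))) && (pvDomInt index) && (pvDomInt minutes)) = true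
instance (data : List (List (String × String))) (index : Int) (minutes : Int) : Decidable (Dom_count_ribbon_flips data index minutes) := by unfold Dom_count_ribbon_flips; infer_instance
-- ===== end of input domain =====

-- B replaces A's fused sequential loop by a divide-and-conquer merge of segment
-- summaries (first direction, last direction, flips); same return value, not faster.


-- shared dict-access helper: point['state'] (first match in the assoc list; a missing key
-- is a KeyError in Python — excluded by Pre_; the getD "" default is never reached there)
def pvStateOf (point : List (String × String)) : String :=
  ((point.find? (fun q => q.1 == "state")).map Prod.snd).getD ""

-- ===== PORT A =====
-- A's loop body: fold state is (flips, last_direction)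
def pvStepA (acc : Int × Option String) (point : List (String × String)) : Int × Option String :=
  let state := PySem.Str.lower (pvStateOf point)
  if PySem.Str.isIn "green" state then
    ((match acc.2 with
      | some l => if l ≠ "green" then acc.1 + 1 else acc.1
      | none => acc.1), some "green")
  else if PySem.Str.isIn "red" state then
    ((match acc.2 with
      | some l => if l ≠ "red" then acc.1 + 1 else acc.1
      | none => acc.1), some "red")
  else acc

def count_ribbon_flips (data : List (List (String × String))) (index : Int) (minutes : Int) : Int :=
  let points_needed := minutes * 6
  let start_idx := max 0 (index - points_needed)
  let window := PySem.List.slice data (some start_idx) (some (index + 1))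
  (window.foldl pvStepA (0, none)).1

-- ===== PORT B =====
def pvDirection (state : String) : Option String :=
  let s := PySem.Str.lower state
  if PySem.Str.isIn "green" s then some "green"
  else if PySem.Str.isIn "red" s then some "red"
  else none

-- Source B's merge of two optional segment summaries (first_dir, last_dir, flips)
def pvMerge (l r : Option (String × String × Int)) : Option (String × String × Int) :=
  match l, r with
  | none, r => r
  | l, none => l
  | some (f1, l1, c1), some (f2, l2, c2) =>
      some (f1, l2, c1 + c2 + (if l1 ≠ f2 then 1 else 0))

-- _summary: divide and conquer; w[:m] / w[m:] with 0 ≤ m ≤ len are exactly take/drop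
def pvSummary (w : List (List (String × String))) : Option (String × String × Int) :=
  if h : w.length ≤ 1 then
    match w with
    | [] => none
    | p :: _ => (pvDirection (pvStateOf p)).map (fun d => (d, d, (0 : Int)))
  else
    let m := w.length / 2
    pvMerge (pvSummary (w.take m)) (pvSummary (w.drop m))
termination_by w.length
decreasing_by
  · simp only [List.length_take]; omega
  · simp only [List.length_drop]; omega

def count_ribbon_flips_alt (data : List (List (String × String))) (index : Int) (minutes : Int) : Int :=
  let window := PySem.List.slice data (some (max 0 (index - minutes * 6))) (some (index + 1))
  match pvSummary window with
  | none => 0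
  | some (_, _, c) => c

-- ===== PRECONDITION & SPEC =====
-- Pre_ excludes exactly the inputs where Python A raises KeyError: a point in the
-- examined window without a "state" key (B raises there too).
def Pre_count_ribbon_flips (data : List (List (String × String))) (index : Int) (minutes : Int) : Prop :=
  ∀ p ∈ PySem.List.slice data (some (max 0 (index - minutes * 6))) (some (index + 1)),
    (p.find? (fun q => q.1 == "state")).isSome = true
instance (data : List (List (String × String))) (index : Int) (minutes : Int) : Decidable (Pre_count_ribbon_flips data index minutes) := by unfold Pre_count_ribbon_flips; infer_instance

def pvWitness_count_ribbon_flips : (List (List (String × String))) × Int × Int :=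
  ([[("state", "GREEN")], [("state", "red")]], 2, 1)

def Spec_count_ribbon_flips (data : List (List (String × String))) (index : Int) (minutes : Int) (out : Int) : Prop := out = count_ribbon_flips_alt data index minutes
instance (data : List (List (String × String))) (index : Int) (minutes : Int) (out : Int) : Decidable (Spec_count_ribbon_flips data index minutes out) := by unfold Spec_count_ribbon_flips; infer_instance

-- ===== CLAIM (what is proved, stated in full; the proofs are below) =====
def Claim_equal_count_ribbon_flips : Prop := ∀ (data : List (List (String × String))) (index : Int) (minutes : Int), Dom_count_ribbon_flips data index minutes → Pre_count_ribbon_flips data index minutes → Spec_count_ribbon_flips data index minutes (count_ribbon_flips data index minutes)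

-- ===== LEMMAS AND PROOFS =====

-- the left-to-right summary specification both programs compute
def pvLin : List (List (String × String)) → Option (String × String × Int)
  | [] => none
  | p :: ws => pvMerge ((pvDirection (pvStateOf p)).map (fun d => (d, d, (0 : Int)))) (pvLin ws)

theorem pvMerge_none_right (l : Option (String × String × Int)) : pvMerge l none = l := by
  cases l <;> rfl

theorem pvMerge_assoc (a b c : Option (String × String × Int)) :
    pvMerge (pvMerge a b) c = pvMerge a (pvMerge b c) := by
  rcases a with _ | ⟨f1, l1, c1⟩ <;> rcases b with _ | ⟨f2, l2, c2⟩ <;>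
    rcases c with _ | ⟨f3, l3, c3⟩ <;> simp [pvMerge] <;> split_ifs <;> simp_all <;> omega

theorem pvLin_append (a b : List (List (String × String))) :
    pvLin (a ++ b) = pvMerge (pvLin a) (pvLin b) := by
  induction a with
  | nil => simp [pvLin, pvMerge]
  | cons p a ih => simp only [List.cons_append, pvLin, ih, pvMerge_assoc]

-- the divide-and-conquer summary equals the linear one
theorem pvSummary_eq_lin (w : List (List (String × String))) : pvSummary w = pvLin w := by
  induction hn : w.length using Nat.strong_induction_on generalizing w with
  | _ n ih =>
    rw [pvSummary]
    by_cases h : w.length ≤ 1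
    · rw [dif_pos h]
      match w, h with
      | [], _ => rfl
      | [p], _ => simp [pvLin, pvMerge_none_right]
    · rw [dif_neg h]
      show pvMerge (pvSummary (List.take (w.length / 2) w)) (pvSummary (List.drop (w.length / 2) w)) = pvLin w
      rw [ih ((w.take (w.length / 2)).length) (by subst hn; simp; omega) _ rfl,
          ih ((w.drop (w.length / 2)).length) (by subst hn; simp; omega) _ rfl,
          ← pvLin_append, List.take_append_drop]

-- flips contributed by a summary when entered with a given last_direction
def pvFlipsOf (last : Option String) (s : Option (String × String × Int)) : Int :=
  match last, s with
  | _, none => 0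
  | none, some (_, _, k) => k
  | some l, some (f, _, k) => k + (if l ≠ f then 1 else 0)

-- loop invariant for A's fold
theorem pvFold_eq (ws : List (List (String × String))) :
    ∀ (c : Int) (last : Option String),
      (ws.foldl pvStepA (c, last)).1 = c + pvFlipsOf last (pvLin ws) := by
  induction ws with
  | nil => intro c last; cases last <;> simp [pvFlipsOf, pvLin]
  | cons p ws ih =>
    intro c last
    rw [List.foldl_cons]
    show ((ws.foldl pvStepA (pvStepA (c, last) p))).1 = _
    have hstep : pvStepA (c, last) p =
        match pvDirection (pvStateOf p) with
        | none => (c, last)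
        | some d => ((match last with
                      | some l => if l ≠ d then c + 1 else c
                      | none => c), some d) := by
      simp only [pvStepA, pvDirection]
      split_ifs <;> rfl
    cases hd : pvDirection (pvStateOf p) with
    | none =>
      rw [hstep]; simp only [hd]
      rw [ih]
      simp [pvLin, hd, pvMerge]
    | some d =>
      rw [hstep]; simp only [hd]
      rw [ih]
      simp only [pvLin, hd, Option.map_some]
      cases hl : pvLin ws with
      | none => cases last <;> simp [pvMerge, pvFlipsOf] <;> split_ifs <;> omega
      | some s =>
        rcases s with ⟨f, l2, k⟩
        cases last <;> simp [pvMerge, pvFlipsOf] <;> split_ifs <;> simp_all <;> omega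

-- ===== VERDICT (by name: the statement is the Claim_ definition above) =====
theorem count_ribbon_flips_spec : Claim_equal_count_ribbon_flips := by
  intro data index minutes _ _
  show count_ribbon_flips data index minutes = count_ribbon_flips_alt data index minutes
  simp only [count_ribbon_flips, count_ribbon_flips_alt]
  rw [pvFold_eq, pvSummary_eq_lin]
  cases pvLin (PySem.List.slice data (some (max 0 (index - minutes * 6))) (some (index + 1))) with
  | none => simp [pvFlipsOf]
  | some s => rcases s with ⟨f, l, k⟩; simp [pvFlipsOf]
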